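-- pv_equiv track=rewrite | github.com/FourierAI/masked-short-sentence-similarity | dataprocess/word_embedding.py | generate_word_index
-- ===== SOURCE A (Python) =====
-- def generate_word_index(sents):
--     word_index = {}
--     count = 0
--     for sent in sents:
--         for word in sent:
--             if word not in word_index:
--                 word_index[word] = count
--                 count += 1
--
--     return word_index
-- ===== SOURCE B (Python) =====
-- def generate_word_index(sents):
--     flat = [w for sent in sents for w in sent]
--     first = {}
--     for i, w in reversed(list(enumerate(flat))):
--         first[w] = i
--     order = sorted(first, key=first.get)
--     return {w: r for r, w in enumerate(order)}
-- ===== Notes on version B (the rewrite author's own statement) =====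
-- stated objective: alternative
-- what changed: Instead of interleaving a dict-membership test with a manual counter, B records each word's first flattened position by overwriting a dict while scanning the flattened words back-to-front, then sorts the distinct words by that position and assigns ranks by enumeration.
import Mathlib
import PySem

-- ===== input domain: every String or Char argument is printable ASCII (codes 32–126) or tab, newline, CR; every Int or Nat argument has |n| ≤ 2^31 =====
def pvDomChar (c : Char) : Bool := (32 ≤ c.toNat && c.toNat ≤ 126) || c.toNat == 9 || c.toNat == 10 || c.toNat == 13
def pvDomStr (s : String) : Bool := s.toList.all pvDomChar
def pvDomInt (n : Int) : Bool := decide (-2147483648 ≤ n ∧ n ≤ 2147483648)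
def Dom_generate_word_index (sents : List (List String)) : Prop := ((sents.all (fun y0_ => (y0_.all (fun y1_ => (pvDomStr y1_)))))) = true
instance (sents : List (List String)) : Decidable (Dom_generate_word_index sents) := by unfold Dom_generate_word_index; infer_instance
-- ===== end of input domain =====

-- B replaces A's interleaved membership-check-plus-counter with a sort-based plan:
-- record each word's first flattened position by overwriting a dict back-to-front,
-- sort the distinct words by that position, and assign ranks by enumeration;
-- objective: alternative (same result, different algorithm).

-- ===== PORT A =====
def generate_word_index (sents : List (List String)) : List (String × Int) :=
  (sents.foldl
    (fun st sent => sent.foldl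
      (fun (st : PySem.Dict String Int × Int) word =>
        if st.1.contains word then st else (st.1.insert word st.2, st.2 + 1))
      st)
    (PySem.Dict.empty, 0)).1.items

-- ===== PORT B =====
-- flat = [w for sent in sents for w in sent]
def pvFlat (sents : List (List String)) : List String := sents.flatMap id

-- first = {}; for i, w in reversed(list(enumerate(flat))): first[w] = i
def pvFirst (flat : List String) : PySem.Dict String Int :=
  (PySem.List.enumerate flat 0).reverse.foldl
    (fun (d : PySem.Dict String Int) p => d.insert p.2 p.1) PySem.Dict.empty

def generate_word_index_alt (sents : List (List String)) : List (String × Int) :=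
  let flat := pvFlat sents
  let first := pvFirst flat
  let order := PySem.List.sorted first.keys (fun w => first.getD w 0) false
  ((PySem.List.enumerate order 0).foldl
    (fun (d : PySem.Dict String Int) p => d.insert p.2 p.1) PySem.Dict.empty).items

-- ===== PRECONDITION & SPEC =====
def Spec_generate_word_index (sents : List (List String)) (out : List (String × Int)) : Prop := out = generate_word_index_alt sents
instance (sents : List (List String)) (out : List (String × Int)) : Decidable (Spec_generate_word_index sents out) := by unfold Spec_generate_word_index; infer_instance

-- ===== CLAIM =====
def Claim_equal_generate_word_index : Prop := ∀ (sents : List (List String)), Dom_generate_word_index sents → Spec_generate_word_index sents (generate_word_index sents)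

-- ===== LEMMAS AND PROOFS =====

-- A's dict keys are the dedup-so-far list, in order.
lemma keys_of_items_swap (d : PySem.Dict String Int) (s : List String)
    (h : d.items = (PySem.List.enumerate s 0).map (fun p => (p.2, p.1))) :
    d.keys = s := by
  have : d.keys = d.items.map Prod.fst := by simp [PySem.Dict.keys]
  rw [this, h, List.map_map]
  have : (Prod.fst ∘ fun p : Int × String => (p.2, p.1)) = (·.2) := rfl
  rw [this, PySem.List.map_snd_enumerate]

-- A's loop invariant: the (dict, count) state corresponds to the dedup list s
-- (items = enumerate s swapped, count = |s|), preserved by each word.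
lemma fold_inv (ws : List String) :
    ∀ (d : PySem.Dict String Int) (s : List String),
    d.items = (PySem.List.enumerate s 0).map (fun p => (p.2, p.1)) → d.keys.Nodup →
    (ws.foldl
      (fun (st : PySem.Dict String Int × Int) word =>
        if st.1.contains word then st else (st.1.insert word st.2, st.2 + 1))
      (d, (s.length : Int))).1.items
      = (PySem.List.enumerate (ws.foldl PySem.Set.add s) 0).map (fun p => (p.2, p.1)) := by
  induction ws with
  | nil => intro d s h _; simpa using h
  | cons w ws ih =>
    intro d s h hnd
    have hkeys : d.keys = s := keys_of_items_swap d s h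
    by_cases hmem : w ∈ s
    · have hc : d.contains w = true := by
        rw [PySem.Dict.contains_iff_mem_keys, hkeys]; exact hmem
      simp only [List.foldl_cons, hc, if_true, PySem.Set.add_of_mem hmem]
      exact ih d s h hnd
    · have hc : d.contains w = false := by
        rw [Bool.eq_false_iff]
        intro hcon
        exact hmem (hkeys ▸ (PySem.Dict.contains_iff_mem_keys d w).mp hcon)
      simp only [List.foldl_cons, hc, PySem.Set.add_of_not_mem hmem]
      have hlen : (s.length : Int) + 1 = ((s ++ [w]).length : Int) := by
        simp
      rw [hlen]
      apply ih
      · rw [PySem.Dict.items_insert_of_not_contains d _ hc, h,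
            PySem.List.enumerate_append]
        simp
      · exact PySem.Dict.nodup_keys_insert d w _ hnd

-- B side.  A last-write-wins fold of (value, key) pairs: the final lookup is the
-- last pair with that key, i.e. the first one of the reversed list.
lemma get?_last_write (ps : List (Int × String)) (d : PySem.Dict String Int) (k : String) :
    (ps.foldl (fun d p => d.insert p.2 p.1) d).get? k =
      ((ps.reverse.find? (fun p => p.2 == k)).map (·.1)).or (d.get? k) := by
  induction ps generalizing d with
  | nil => simp
  | cons p ps ih =>
    simp only [List.foldl_cons, List.reverse_cons, List.find?_append, ih]
    cases h : ps.reverse.find? (fun q => q.2 == k) with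
    | some q => simp
    | none =>
      simp only [Option.none_or, List.find?_cons, List.find?_nil]
      rw [PySem.Dict.get?_insert]
      by_cases hk : p.2 = k
      · simp [hk]
      · have hb : (p.2 == k) = false := by simp [hk]
        simp [hb, Ne.symm hk]

-- find? over enumerate locates the first occurrence, i.e. idxOf.
lemma find?_enumerate (l : List String) (k : String) (h : k ∈ l) :
    ∀ (s : Int), (PySem.List.enumerate l s).find? (fun p => p.2 == k)
      = some (s + (l.idxOf k : Int), k) := by
  induction l with
  | nil => cases h
  | cons x xs ih =>
    intro s
    rw [PySem.List.enumerate_cons]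
    by_cases hx : x = k
    · subst hx
      simp [List.idxOf_cons_self]
    · have hk : k ∈ xs := by
        cases List.mem_cons.mp h with
        | inl h' => exact absurd h'.symm hx
        | inr h' => exact h'
      have : ((x :: xs).idxOf k : Int) = (xs.idxOf k : Int) + 1 := by
        rw [List.idxOf_cons_ne _ hx]; push_cast; ring
      rw [List.find?_cons_of_neg (by simp [hx]), ih hk (s + 1), this]
      congr 2
      ring

-- For a word of flat, B's "first" dict returns its first flattened position.
lemma first_getD (flat : List String) (w : String) (h : w ∈ flat) :
    (pvFirst flat).getD w 0 = (flat.idxOf w : Int) := by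
  unfold pvFirst
  rw [PySem.Dict.getD_eq_get?_getD, get?_last_write, List.reverse_reverse,
      find?_enumerate flat w h 0]
  simp

-- B's "first" dict keys hold exactly the words of flat, without duplicates.
lemma first_keys (flat : List String) :
    (pvFirst flat).keys = PySem.Set.ofList flat.reverse := by
  unfold pvFirst
  have h : (List.foldl (fun (d : PySem.Dict String Int) p => d.insert p.2 p.1)
      PySem.Dict.empty (PySem.List.enumerate flat 0).reverse).keys
      = PySem.Set.update PySem.Dict.empty.keys
          (((PySem.List.enumerate flat 0).reverse).map (·.2)) :=
    PySem.Dict.keys_foldl_insert_key _ (fun p : Int × String => p.2)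
      (fun _ (p : Int × String) => p.1) _
  rw [h, PySem.Dict.keys_empty, PySem.Set.update_nil_left,
      List.map_reverse, PySem.List.map_snd_enumerate]

-- The dedup list is ordered by first occurrence: idxOf is strictly increasing along it.
lemma dedup_aux (full : List String) : ∀ (rest pre s : List String),
    full = pre ++ rest →
    (∀ a, a ∈ s ↔ a ∈ pre) →
    s.Pairwise (fun a b => full.idxOf a < full.idxOf b) →
    (rest.foldl PySem.Set.add s).Pairwise (fun a b => full.idxOf a < full.idxOf b) := by
  intro rest
  induction rest with
  | nil => intro pre s _ _ hp; simpa using hp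
  | cons x xs ih =>
    intro pre s heq hmem hp
    simp only [List.foldl_cons]
    by_cases hx : x ∈ s
    · rw [PySem.Set.add_of_mem hx]
      refine ih (pre ++ [x]) s (by simp [heq]) (fun a => ?_) hp
      rw [hmem]
      constructor
      · intro ha; exact List.mem_append_left _ ha
      · intro ha
        cases List.mem_append.mp ha with
        | inl h' => exact h'
        | inr h' =>
          rw [List.mem_singleton.mp h']
          exact (hmem x).mp hx
    · rw [PySem.Set.add_of_not_mem hx]
      have hxpre : x ∉ pre := fun hc => hx ((hmem x).mpr hc)
      have hidx : full.idxOf x = pre.length := by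
        rw [heq, List.idxOf_append_of_notMem hxpre, List.idxOf_cons_self]
        omega
      refine ih (pre ++ [x]) (s ++ [x]) (by simp [heq]) (fun a => ?_) ?_
      · simp only [List.mem_append, List.mem_singleton, hmem a]
      · rw [List.pairwise_append]
        refine ⟨hp, List.pairwise_singleton _ _, ?_⟩
        intro a ha b hb
        rw [List.mem_singleton.mp hb, hidx]
        have hapre : a ∈ pre := (hmem a).mp ha
        rw [heq, List.idxOf_append_of_mem hapre]
        exact List.idxOf_lt_length_of_mem hapre

lemma dedup_pairwise (l : List String) :
    (PySem.List.dedup l).Pairwise (fun a b => l.idxOf a < l.idxOf b) := by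
  rw [PySem.List.dedup_eq_ofList, PySem.Set.ofList_eq_foldl]
  exact dedup_aux l l [] [] rfl (by simp) (by simp)

-- B's sort by first position reproduces first-appearance order: it IS dedup flat.
lemma order_eq (flat : List String) :
    PySem.List.sorted (pvFirst flat).keys (fun w => (pvFirst flat).getD w 0) false
      = PySem.List.dedup flat := by
  apply PySem.List.sorted_eq_of_perm_of_pairwise_lt
  · apply (List.perm_ext_iff_of_nodup (PySem.List.nodup_dedup flat) ?_).mpr
    · intro a
      rw [PySem.List.mem_dedup, first_keys, PySem.Set.mem_ofList, List.mem_reverse]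
    · rw [first_keys]
      exact PySem.Set.nodup_ofList _
  · have h1 : (PySem.List.dedup flat).Pairwise
        (fun a b => (flat.idxOf a : Int) < (flat.idxOf b : Int)) :=
      (dedup_pairwise flat).imp (fun h => by exact_mod_cast h)
    refine List.Pairwise.imp_of_mem (fun {a b} ha hb h => ?_) h1
    rw [first_getD flat a ((PySem.List.mem_dedup flat a).mp ha),
        first_getD flat b ((PySem.List.mem_dedup flat b).mp hb)]
    exact h

-- ===== VERDICT (by name: the statement is the Claim_ definition above) =====
theorem generate_word_index_spec : Claim_equal_generate_word_index := by
  intro sents _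
  unfold Spec_generate_word_index generate_word_index generate_word_index_alt
  simp only [pvFlat, List.flatMap_id, order_eq]
  -- B's final dict comprehension over the nodup list appends fresh keys in order
  have hB : (List.foldl (fun (d : PySem.Dict String Int) p => d.insert p.2 p.1)
      PySem.Dict.empty (PySem.List.enumerate (PySem.List.dedup sents.flatten) 0)).items
      = PySem.Dict.empty.items
        ++ (PySem.List.enumerate (PySem.List.dedup sents.flatten) 0).map (fun p => (p.2, p.1)) :=
    PySem.Dict.items_foldl_insert_fresh _ (fun p : Int × String => p.2)
      (fun p : Int × String => p.1) PySem.Dict.empty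
      (fun a _ => PySem.Dict.contains_empty _)
      (by rw [show (fun p : Int × String => p.2) = (fun p : Int × String => p.2) from rfl,
              PySem.List.map_snd_enumerate]
          exact PySem.List.nodup_dedup _)
  rw [hB]
  -- A's nested loop equals the dedup fold over the flattened words
  rw [← List.foldl_flatten]
  have h := fold_inv sents.flatten PySem.Dict.empty [] (by rfl)
    PySem.Dict.nodup_keys_empty
  simp only [List.length_nil, Int.natCast_zero] at h
  rw [h, PySem.List.dedup_eq_ofList, PySem.Set.ofList_eq_foldl]
  simp [PySem.Dict.empty]
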